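-- pv_equiv track=rewrite | github.com/nikhildobariya5818/SouthCountyBot | MiamiDadeTaxDel.py | CheckCompany
-- ===== SOURCE A (Python) =====
-- def CheckAnd(Name: str):
--     if isinstance(Name, str) and " &" in Name:
--         if len(Name.split(" &")[0].split(" ")) > 1:
--             return Name.split(" &")[0]
--         else:
--             return Name.split(" ")[0] + " " + Name.split(" ")[-1]
--     else:
--         return Name
--
-- def CheckCompany(Name: str):
--     SplitInfo = ["EST OF", " LLC", " (EST OF)", " (TR)", " TR", " TRS", " LP", " INC", " JTRS", " TRUST", " LIV",
--                  " ARENAS",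
--                  " INVESTMENTS", "SETTLES", "INTERNATIONAL", "INVESTMENT", "MIAMI-DADE", "CITY", "COUNTY", "LTD",
--                  "CORP",
--                  "FUND", "PARTNERSHIP", "PARTNERS", "PARTNER", "ASSOCIATES", "ASSOCIATE", "ASSOC", "DEVELOPMENT",
--                  "HABITAT", " EST", "MISSIONARY", "CHURCH", "RESIDENTIAL", "NEW LIFE", "OUTREACH",
--                  "COMMUNITY", "BEACH", "TEMPLE", "GOD", "MINISTRIES", "RANCHES", "POST", "TOWNHOMES", "HOUSING",
--                  "METHODIST", "CONSULTANCY", "PROJECT", "ESTATE", "INVESTORS", "CENTER", "CLUB",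
--                  "ENTERPRISE", "ORTHODOX", "TABERNACLE", "HOSPITAL", "ARCHBISHOP", "STREET", "CONFERENCE ASSN",
--                  "REALITY",
--                  "ARCHDIOCESE", "DIOCESE", "(AGD)", "TRUST", ]
--     Name = CheckAnd(Name)
--     for Split in SplitInfo:
--         if Split in Name:
--             return True
--     return False
-- ===== SOURCE B (Python) =====
-- def CheckAnd(Name: str):
--     if isinstance(Name, str) and " &" in Name:
--         if len(Name.split(" &")[0].split(" ")) > 1:
--             return Name.split(" &")[0]
--         else:
--             return Name.split(" ")[0] + " " + Name.split(" ")[-1]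
--     else:
--         return Name
--
--
-- # Keyword table kept as one newline-joined string, split once at import time.
-- _KEYWORDS = ("EST OF\n LLC\n (EST OF)\n (TR)\n TR\n TRS\n LP\n INC\n JTRS\n TRUST\n LIV\n"
--              " ARENAS\n INVESTMENTS\nSETTLES\nINTERNATIONAL\nINVESTMENT\nMIAMI-DADE\nCITY\n"
--              "COUNTY\nLTD\nCORP\nFUND\nPARTNERSHIP\nPARTNERS\nPARTNER\nASSOCIATES\nASSOCIATE\n"
--              "ASSOC\nDEVELOPMENT\nHABITAT\n EST\nMISSIONARY\nCHURCH\nRESIDENTIAL\nNEW LIFE\n"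
--              "OUTREACH\nCOMMUNITY\nBEACH\nTEMPLE\nGOD\nMINISTRIES\nRANCHES\nPOST\nTOWNHOMES\n"
--              "HOUSING\nMETHODIST\nCONSULTANCY\nPROJECT\nESTATE\nINVESTORS\nCENTER\nCLUB\n"
--              "ENTERPRISE\nORTHODOX\nTABERNACLE\nHOSPITAL\nARCHBISHOP\nSTREET\nCONFERENCE ASSN\n"
--              "REALITY\nARCHDIOCESE\nDIOCESE\n(AGD)\nTRUST").split("\n")
--
--
-- # Index of the keywords by their first character, built once.
-- _BUCKETS = {}
-- for _k in _KEYWORDS: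
--     _BUCKETS.setdefault(_k[0], []).append(_k)
--
--
-- def CheckCompany(Name: str):
--     # One left-to-right scan of the name: at each position, test only the
--     # keywords whose first character matches, instead of one full substring
--     # search per keyword.
--     s = CheckAnd(Name)
--     n = len(s)
--     i = 0
--     while i < n:
--         for k in _BUCKETS.get(s[i], ()):
--             if s.startswith(k, i):
--                 return True
--         i += 1
--     return False
-- ===== Notes on version B (the rewrite author's own statement) =====
-- stated objective: alternative
-- what changed: B stores the keyword table as one newline-joined string split once, indexes the keywords by first character in a dict built once, and replaces A's per-keyword substring searches by a single left-to-right scan of the name that tests at each position only the keywords bucketed under the character found there.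
import Mathlib
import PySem

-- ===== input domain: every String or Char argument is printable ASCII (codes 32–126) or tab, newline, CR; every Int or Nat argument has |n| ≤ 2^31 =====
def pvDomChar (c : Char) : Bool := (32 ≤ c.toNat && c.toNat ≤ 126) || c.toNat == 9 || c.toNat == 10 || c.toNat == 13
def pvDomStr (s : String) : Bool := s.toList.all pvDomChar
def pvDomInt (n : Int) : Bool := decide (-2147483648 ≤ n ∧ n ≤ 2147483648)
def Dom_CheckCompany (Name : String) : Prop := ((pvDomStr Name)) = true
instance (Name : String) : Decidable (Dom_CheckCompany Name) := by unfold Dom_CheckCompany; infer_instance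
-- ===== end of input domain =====

-- B replaces A's per-keyword substring searches by one left-to-right scan of the
-- name, testing at each position only the keywords indexed (in a dict built once)
-- under the character found there; keyword table split once from one joined string.

-- ===== PORT A =====
-- shared helper of both Pythons (identical in Source A and Source B)
def CheckAnd (Name : String) : String :=
  if PySem.Str.isIn " &" Name then
    -- split? with a nonempty separator always returns some nonempty list,
    -- so the Python indexings [0] and [-1] cannot raise; getD "" is unreachable
    let amp := (PySem.Str.split? Name " &").getD []
    let first := (PySem.List.pyGet? amp 0).getD ""
    if ((PySem.Str.split? first " ").getD []).length > 1 then
      first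
    else
      let sp := (PySem.Str.split? Name " ").getD []
      ((PySem.List.pyGet? sp 0).getD "") ++ " " ++ ((PySem.List.pyGet? sp (-1)).getD "")
  else
    Name

-- A's literal keyword list
def CheckCompanySplitInfo : List String :=
  ["EST OF", " LLC", " (EST OF)", " (TR)", " TR", " TRS", " LP", " INC", " JTRS", " TRUST", " LIV",
   " ARENAS",
   " INVESTMENTS", "SETTLES", "INTERNATIONAL", "INVESTMENT", "MIAMI-DADE", "CITY", "COUNTY", "LTD",
   "CORP",
   "FUND", "PARTNERSHIP", "PARTNERS", "PARTNER", "ASSOCIATES", "ASSOCIATE", "ASSOC", "DEVELOPMENT",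
   "HABITAT", " EST", "MISSIONARY", "CHURCH", "RESIDENTIAL", "NEW LIFE", "OUTREACH",
   "COMMUNITY", "BEACH", "TEMPLE", "GOD", "MINISTRIES", "RANCHES", "POST", "TOWNHOMES", "HOUSING",
   "METHODIST", "CONSULTANCY", "PROJECT", "ESTATE", "INVESTORS", "CENTER", "CLUB",
   "ENTERPRISE", "ORTHODOX", "TABERNACLE", "HOSPITAL", "ARCHBISHOP", "STREET", "CONFERENCE ASSN",
   "REALITY",
   "ARCHDIOCESE", "DIOCESE", "(AGD)", "TRUST"]

-- A: loop over the keywords, early-return True on the first one contained in Name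
def CheckCompany (Name : String) : Bool :=
  let Name := CheckAnd Name
  CheckCompanySplitInfo.any (fun Split => PySem.Str.isIn Split Name)

-- ===== PORT B =====
-- B's keyword table: one joined string, split once ('_KEYWORDS' of Source B)
def pvAltKeywords : List String :=
  (PySem.Str.split? ("EST OF\n LLC\n (EST OF)\n (TR)\n TR\n TRS\n LP\n INC\n JTRS\n TRUST\n LIV\n" ++
     " ARENAS\n INVESTMENTS\nSETTLES\nINTERNATIONAL\nINVESTMENT\nMIAMI-DADE\nCITY\n" ++
     "COUNTY\nLTD\nCORP\nFUND\nPARTNERSHIP\nPARTNERS\nPARTNER\nASSOCIATES\nASSOCIATE\n" ++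
     "ASSOC\nDEVELOPMENT\nHABITAT\n EST\nMISSIONARY\nCHURCH\nRESIDENTIAL\nNEW LIFE\n" ++
     "OUTREACH\nCOMMUNITY\nBEACH\nTEMPLE\nGOD\nMINISTRIES\nRANCHES\nPOST\nTOWNHOMES\n" ++
     "HOUSING\nMETHODIST\nCONSULTANCY\nPROJECT\nESTATE\nINVESTORS\nCENTER\nCLUB\n" ++
     "ENTERPRISE\nORTHODOX\nTABERNACLE\nHOSPITAL\nARCHBISHOP\nSTREET\nCONFERENCE ASSN\n" ++
     "REALITY\nARCHDIOCESE\nDIOCESE\n(AGD)\nTRUST") "\n").getD []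

-- Python _k[0]; every keyword is nonempty, so the getD default is unreachable
def pvKeyChar (k : String) : Char := (PySem.Str.pyGet? k 0).getD ' '

-- the '_BUCKETS' dict: keywords indexed by first character
-- (setdefault(_k[0], []).append(_k) = d[c] = d.get(c, []) + [_k], i.e. Dict.modify)
def pvBuckets : PySem.Dict Char (List String) :=
  pvAltKeywords.foldl (fun d k => d.modify (pvKeyChar k) [] (· ++ [k])) PySem.Dict.empty

-- B's while loop over positions i: only the keywords bucketed under s[i] are
-- tested; s.startswith(k, i) is 'k is a prefix of the suffix from i'
def pvAltScan : List Char → Bool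
  | [] => false
  | c :: t =>
      if (PySem.Dict.getD pvBuckets c []).any
           (fun k => PySem.Chars.startswith (c :: t) k.toList) then true
      else pvAltScan t

def CheckCompany_alt (Name : String) : Bool :=
  pvAltScan (CheckAnd Name).toList

-- ===== PRECONDITION & SPEC =====
def Spec_CheckCompany (Name : String) (out : Bool) : Prop := out = CheckCompany_alt Name
instance (Name : String) (out : Bool) : Decidable (Spec_CheckCompany Name out) := by unfold Spec_CheckCompany; infer_instance

-- ===== CLAIM (what is proved, stated in full; the proofs are below) =====
def Claim_equal_CheckCompany : Prop := ∀ (Name : String), Dom_CheckCompany Name → Spec_CheckCompany Name (CheckCompany Name)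

-- ===== LEMMAS AND PROOFS =====

-- B's split-once keyword table is A's literal list
set_option maxRecDepth 100000 in
set_option maxHeartbeats 2000000 in
theorem pv_keywords_eq : pvAltKeywords = CheckCompanySplitInfo := by decide

-- every keyword is a nonempty string
theorem pv_keywords_ne_nil : ∀ k ∈ pvAltKeywords, k.toList ≠ [] := by
  rw [pv_keywords_eq]; decide

-- _k[0] of a nonempty keyword is its first character
theorem pv_keyChar_eq (k : String) (h : Char) (tl : List Char) (hk : k.toList = h :: tl) :
    pvKeyChar k = h := by
  unfold pvKeyChar
  simp [PySem.Str.pyGet?, hk, PySem.Chars.pyGet?, PySem.List.pyGet?, PySem.List.pyIdx?]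

-- the bucket under c holds exactly the keywords whose first character is c, in order
theorem pv_bucket_getD (c : Char) :
    PySem.Dict.getD pvBuckets c [] = pvAltKeywords.filter (fun k => pvKeyChar k == c) := by
  unfold pvBuckets
  have h := PySem.Dict.getD_foldl_modify_append
    (l := pvAltKeywords.map (fun k => (pvKeyChar k, k))) (d := PySem.Dict.empty) (c := c)
  rw [List.foldl_map] at h
  simp only [List.filter_map, List.map_map, Function.comp_def, PySem.Dict.getD_empty,
    List.nil_append, List.map_id'] at h
  exact h

-- the bucketed position scan finds a keyword iff some keyword is a substring
theorem pv_scan_eq (s : List Char) :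
    pvAltScan s = pvAltKeywords.any (fun p => PySem.Chars.isIn p.toList s) := by
  induction s with
  | nil =>
      simp only [pvAltScan]
      symm
      rw [List.any_eq_false]
      intro p hp
      rw [Bool.not_eq_true, PySem.Chars.isIn_eq_false_iff]
      intro hinf
      exact pv_keywords_ne_nil p hp (List.eq_nil_of_infix_nil hinf)
  | cons c t ih =>
      rw [pvAltScan, pv_bucket_getD, List.any_filter]
      have hcond : pvAltKeywords.any
            (fun k => (pvKeyChar k == c) && PySem.Chars.startswith (c :: t) k.toList)
          = pvAltKeywords.any (fun k => PySem.Chars.startswith (c :: t) k.toList) := by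
        apply PySem.List.any_congr_mem
        intro k hk
        cases hsw : PySem.Chars.startswith (c :: t) k.toList with
        | false => simp
        | true =>
            have hpre := (PySem.Chars.startswith_iff _ _).mp hsw
            obtain ⟨h, tl, hk2⟩ : ∃ h tl, k.toList = h :: tl := by
              cases hkl : k.toList with
              | nil => exact absurd hkl (pv_keywords_ne_nil k hk)
              | cons a b => exact ⟨a, b, rfl⟩
            rw [hk2] at hpre
            rw [pv_keyChar_eq k h tl hk2, (List.cons_prefix_cons.mp hpre).1]
            simp
      rw [hcond]
      split_ifs with h
      · symm
        rw [List.any_eq_true] at h ⊢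
        obtain ⟨p, hp, hsw⟩ := h
        refine ⟨p, hp, ?_⟩
        rw [PySem.Chars.isIn_iff_infix]
        exact ((PySem.Chars.startswith_iff _ _).mp hsw).isInfix
      · rw [ih, Bool.eq_iff_iff]
        simp only [List.any_eq_true] at h ⊢
        constructor
        · rintro ⟨p, hp, hin⟩
          refine ⟨p, hp, ?_⟩
          rw [PySem.Chars.isIn_iff_infix] at hin ⊢
          exact List.infix_cons_iff.mpr (Or.inr hin)
        · rintro ⟨p, hp, hin⟩
          rw [PySem.Chars.isIn_iff_infix, List.infix_cons_iff] at hin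
          cases hin with
          | inl hpre => exact absurd ⟨p, hp, (PySem.Chars.startswith_iff _ _).mpr hpre⟩ h
          | inr hinf => exact ⟨p, hp, (PySem.Chars.isIn_iff_infix _ _).mpr hinf⟩

-- ===== VERDICT (by name: the statement is the Claim_ definition above) =====
theorem CheckCompany_spec : Claim_equal_CheckCompany := by
  intro Name _
  unfold Spec_CheckCompany CheckCompany CheckCompany_alt
  rw [pv_scan_eq, pv_keywords_eq]
  apply PySem.List.any_congr_mem
  intro p _
  simp [PySem.Str.isIn_eq]
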